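-- pv_equiv track=rewrite | github.com/kreeshnaydv/Programming-for-developers | question3/magical_words.py | max_magical_power
-- ===== SOURCE A (Python) =====
-- def max_magical_power(M: str) -> int:
--     """
--     Returns the maximum product of lengths of two non-overlapping odd-length palindromic substrings.
--     Args:
--         M: The manuscript string.
--     Returns:
--         Maximum product of lengths.
--     """
--     n = len(M)
--     # Find all odd-length palindromes
--     palindromes = []  # (start, end, length)
--     for center in range(n):
--         l = r = center
--         while l >= 0 and r < n and M[l] == M[r]:
--             if (r - l + 1) % 2 == 1:
--                 palindromes.append((l, r, r - l + 1))
--             l -= 1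
--             r += 1
--     # Try all pairs of non-overlapping palindromes
--     max_product = 0
--     for i in range(len(palindromes)):
--         for j in range(i + 1, len(palindromes)):
--             a = palindromes[i]
--             b = palindromes[j]
--             # Check non-overlapping
--             if a[1] < b[0] or b[1] < a[0]:
--                 max_product = max(max_product, a[2] * b[2])
--     return max_product
-- ===== SOURCE B (Python) =====
-- def max_magical_power(M: str) -> int:
--     """Radius-per-center + best-ending/best-starting split combine; no pairwise palindrome scan."""
--     n = len(M)
--     if n < 2:
--         return 0
--     rad = []
--     for c in range(n):
--         k = 0
--         while c - k - 1 >= 0 and c + k + 1 < n and M[c - k - 1] == M[c + k + 1]: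
--             k += 1
--         rad.append(k)
--     # pref[s]: longest odd palindrome ending at or before s; suf[s]: starting at or after s
--     pref = [max(2 * min(s - c, rad[c]) + 1 for c in range(s + 1)) for s in range(n)]
--     suf = [max(2 * min(c - s, rad[c]) + 1 for c in range(s, n)) for s in range(n)]
--     return max(pref[s] * suf[s + 1] for s in range(n - 1))
-- ===== Notes on version B (the rewrite author's own statement) =====
-- stated objective: faster
-- what changed: A collects every odd palindromic substring and then scans all pairs of them (O(P^2) with P=O(n^2) palindromes, O(n^4) worst case); B computes one radius per center and combines a best-palindrome-ending-before / best-starting-after table over split points, so the pairwise palindrome scan disappears (O(n^2)).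
import Mathlib
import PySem

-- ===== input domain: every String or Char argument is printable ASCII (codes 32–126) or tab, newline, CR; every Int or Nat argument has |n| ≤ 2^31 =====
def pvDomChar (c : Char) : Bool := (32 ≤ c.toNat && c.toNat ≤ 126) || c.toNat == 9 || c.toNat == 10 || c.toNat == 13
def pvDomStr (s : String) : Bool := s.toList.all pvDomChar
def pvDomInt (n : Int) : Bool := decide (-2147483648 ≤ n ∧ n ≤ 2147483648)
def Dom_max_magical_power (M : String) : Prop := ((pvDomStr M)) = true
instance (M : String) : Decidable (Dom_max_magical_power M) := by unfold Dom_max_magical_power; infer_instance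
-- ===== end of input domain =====

-- B replaces A's all-palindromes list + all-pairs scan by per-center radii combined over split
-- points (best palindrome ending ≤ s times best starting ≥ s+1); measured asymptotically faster.


-- ===== PORT A =====
-- the expand-around-center while loop of A (fuel = n+1 always suffices: l stays ≥ 0)
def pvExpandA (M : String) (n : Int) (l r : Int) (fuel : Nat)
    (acc : List (Int × Int × Int)) : List (Int × Int × Int) :=
  match fuel with
  | 0 => acc
  | f + 1 =>
    if 0 ≤ l ∧ r < n ∧ PySem.Str.pyGet? M l = PySem.Str.pyGet? M r then
      pvExpandA M n (l - 1) (r + 1) f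
        (if PySem.Int.mod (r - l + 1) 2 = 1 then acc ++ [(l, r, r - l + 1)] else acc)
    else acc

def max_magical_power (M : String) : Int :=
  let n : Int := PySem.Str.len M
  let palindromes : List (Int × Int × Int) :=
    (PySem.List.pyRange 0 n 1).foldl
      (fun acc center => pvExpandA M n center center (n.toNat + 1) acc) []
  (PySem.List.pyRange 0 (PySem.List.len palindromes) 1).foldl
    (fun mp i =>
      (PySem.List.pyRange (i + 1) (PySem.List.len palindromes) 1).foldl
        (fun mp j =>
          let a := PySem.List.pyGetD palindromes i (0, 0, 0)
          let b := PySem.List.pyGetD palindromes j (0, 0, 0)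
          if a.2.1 < b.1 ∨ b.2.1 < a.1 then max mp (a.2.2 * b.2.2) else mp)
        mp)
    0

-- ===== PORT B =====
-- B's radius while loop (fuel = n+1 always suffices: the loop needs c+k+1 < n)
def pvRadLoop (M : String) (n c k : Int) (fuel : Nat) : Int :=
  match fuel with
  | 0 => k
  | f + 1 =>
    if 0 ≤ c - k - 1 ∧ c + k + 1 < n ∧
        PySem.Str.pyGet? M (c - k - 1) = PySem.Str.pyGet? M (c + k + 1) then
      pvRadLoop M n c (k + 1) f
    else k

def max_magical_power_alt (M : String) : Int :=
  let n : Int := PySem.Str.len M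
  if n < 2 then 0
  else
    let rad : List Int :=
      (PySem.List.pyRange 0 n 1).foldl
        (fun acc c => acc ++ [pvRadLoop M n c 0 (n.toNat + 1)]) []
    let pref : List Int :=
      (PySem.List.pyRange 0 n 1).map (fun s =>
        PySem.List.maxD
          ((PySem.List.pyRange 0 (s + 1) 1).map
            (fun c => 2 * min (s - c) (PySem.List.pyGetD rad c 0) + 1)) (fun x => x) 0)
    let suf : List Int :=
      (PySem.List.pyRange 0 n 1).map (fun s =>
        PySem.List.maxD
          ((PySem.List.pyRange s n 1).map
            (fun c => 2 * min (c - s) (PySem.List.pyGetD rad c 0) + 1)) (fun x => x) 0)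
    PySem.List.maxD
      ((PySem.List.pyRange 0 (n - 1) 1).map
        (fun s => PySem.List.pyGetD pref s 0 * PySem.List.pyGetD suf (s + 1) 0)) (fun x => x) 0

-- ===== PRECONDITION & SPEC =====
def Spec_max_magical_power (M : String) (out : Int) : Prop := out = max_magical_power_alt M
instance (M : String) (out : Int) : Decidable (Spec_max_magical_power M out) := by unfold Spec_max_magical_power; infer_instance

-- ===== CLAIM (what is proved, stated in full; the proofs are below) =====
def Claim_equal_max_magical_power : Prop := ∀ (M : String), Dom_max_magical_power M → Spec_max_magical_power M (max_magical_power M)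

-- ===== LEMMAS AND PROOFS =====

-- ---- proof-side model definitions ----

def pvTri (c t : Int) : Int × Int × Int := (c - t, c + t, 2 * t + 1)

def pvK (M : String) (n c : Int) : Int := pvRadLoop M n c 0 (n.toNat + 1)

def pvL (M : String) (n : Int) : List (Int × Int × Int) :=
  (PySem.List.pyRange 0 n 1).flatMap
    (fun c => (PySem.List.pyRange 0 (pvK M n c + 1) 1).map (pvTri c))

def pvPairFold (L : List (Int × Int × Int)) : Int :=
  (PySem.List.pyRange 0 (PySem.List.len L) 1).foldl
    (fun mp i =>
      (PySem.List.pyRange (i + 1) (PySem.List.len L) 1).foldl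
        (fun mp j =>
          let a := PySem.List.pyGetD L i (0, 0, 0)
          let b := PySem.List.pyGetD L j (0, 0, 0)
          if a.2.1 < b.1 ∨ b.2.1 < a.1 then max mp (a.2.2 * b.2.2) else mp)
        mp)
    0

def pvGood (M : String) (n c t : Int) : Prop := 0 ≤ c ∧ c < n ∧ 0 ≤ t ∧ t ≤ pvK M n c

def pvPref (M : String) (n s : Int) : Int :=
  PySem.List.maxD
    ((PySem.List.pyRange 0 (s + 1) 1).map (fun c => 2 * min (s - c) (pvK M n c) + 1))
    (fun x => x) 0

def pvSuf (M : String) (n s : Int) : Int :=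
  PySem.List.maxD
    ((PySem.List.pyRange s n 1).map (fun c => 2 * min (c - s) (pvK M n c) + 1))
    (fun x => x) 0

def pvB (M : String) (n : Int) : Int :=
  if n < 2 then 0
  else
    PySem.List.maxD
      ((PySem.List.pyRange 0 (n - 1) 1).map (fun s => pvPref M n s * pvSuf M n (s + 1)))
      (fun x => x) 0

-- ---- generic foldl facts ----

theorem pvFoldlLeOfLe {α : Type} (l : List α) (f : Int → α → Int) (B init : Int)
    (h0 : init ≤ B) (hstep : ∀ acc x, x ∈ l → acc ≤ B → f acc x ≤ B) :
    l.foldl f init ≤ B := by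
  induction l generalizing init with
  | nil => simpa using h0
  | cons a t ih =>
    simp only [List.foldl_cons]
    exact ih _ (hstep _ _ (by simp) h0) (fun acc x hx h => hstep acc x (by simp [hx]) h)

theorem pvFoldlGeInit {α : Type} (l : List α) (f : Int → α → Int) (init : Int)
    (h : ∀ acc x, x ∈ l → acc ≤ f acc x) : init ≤ l.foldl f init := by
  induction l generalizing init with
  | nil => simp
  | cons a t ih =>
    simp only [List.foldl_cons]
    exact le_trans (h init a (by simp)) (ih _ (fun acc x hx => h acc x (by simp [hx])))

theorem pvFoldlGeOfMem {α : Type} (l : List α) (f : Int → α → Int) (init v : Int) (x : α)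
    (hx : x ∈ l) (hmono : ∀ acc y, y ∈ l → acc ≤ f acc y) (hval : ∀ acc, v ≤ f acc x) :
    v ≤ l.foldl f init := by
  obtain ⟨l1, l2, rfl⟩ := List.append_of_mem hx
  rw [List.foldl_append, List.foldl_cons]
  exact le_trans (hval _)
    (pvFoldlGeInit l2 f _ (fun acc y hy => hmono acc y (by simp [hy])))

-- ---- maxD over a mapped range ----

theorem pvMaxD_eq_foldl (a b : Int) (hab : a < b) (f : Int → Int) :
    PySem.List.maxD ((PySem.List.pyRange a b 1).map f) (fun x => x) 0 =
      ((PySem.List.pyRange (a + 1) b 1).map f).foldl max (f a) := by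
  rw [PySem.List.pyRange_one_cons hab, List.map_cons]
  unfold PySem.List.maxD
  rw [PySem.List.max?_id_cons]
  rfl

theorem pvMaxD_le (a b : Int) (hab : a < b) (f : Int → Int) (B : Int)
    (h : ∀ c, a ≤ c → c < b → f c ≤ B) :
    PySem.List.maxD ((PySem.List.pyRange a b 1).map f) (fun x => x) 0 ≤ B := by
  rw [pvMaxD_eq_foldl a b hab f]
  apply pvFoldlLeOfLe _ _ B _ (h a le_rfl hab)
  intro acc x hx hacc
  simp only [List.mem_map, PySem.List.mem_pyRange_one] at hx
  obtain ⟨c, ⟨hc1, hc2⟩, rfl⟩ := hx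
  exact max_le hacc (h c (by omega) hc2)

theorem pvLe_maxD (a b c : Int) (ha : a ≤ c) (hc : c < b) (f : Int → Int) :
    f c ≤ PySem.List.maxD ((PySem.List.pyRange a b 1).map f) (fun x => x) 0 := by
  rw [pvMaxD_eq_foldl a b (by omega) f]
  rcases eq_or_lt_of_le ha with rfl | hlt
  · exact (PySem.List.le_foldl_max _ _).1
  · exact (PySem.List.le_foldl_max _ _).2 (f c)
      (by simp only [List.mem_map]; exact ⟨c, by rw [PySem.List.mem_pyRange_one]; omega, rfl⟩)

theorem pvMaxD_mem (a b : Int) (hab : a < b) (f : Int → Int) :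
    ∃ c, a ≤ c ∧ c < b ∧
      PySem.List.maxD ((PySem.List.pyRange a b 1).map f) (fun x => x) 0 = f c := by
  rw [pvMaxD_eq_foldl a b hab f]
  rcases PySem.List.foldl_max_mem ((PySem.List.pyRange (a + 1) b 1).map f) (f a) with h | h
  · exact ⟨a, le_rfl, hab, h⟩
  · simp only [List.mem_map, PySem.List.mem_pyRange_one] at h
    obtain ⟨c, ⟨hc1, hc2⟩, hc3⟩ := h
    exact ⟨c, by omega, hc2, hc3.symm⟩

-- ---- the radius loop ----

theorem pvRadLoop_ge (M : String) (n c : Int) :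
    ∀ (f : Nat) (k : Int), k ≤ pvRadLoop M n c k f := by
  intro f
  induction f with
  | zero => intro k; simp [pvRadLoop]
  | succ f ih =>
    intro k
    unfold pvRadLoop
    split
    · exact le_trans (by omega) (ih (k + 1))
    · exact le_rfl

theorem pvRadLoop_fuel (M : String) (n c : Int) :
    ∀ (f1 f2 : Nat) (k : Int), (n - c - 1 - k).toNat ≤ f1 → (n - c - 1 - k).toNat ≤ f2 →
      pvRadLoop M n c k f1 = pvRadLoop M n c k f2 := by
  intro f1
  induction f1 with
  | zero =>
    intro f2 k h1 h2
    have hnP : ¬(0 ≤ c - k - 1 ∧ c + k + 1 < n ∧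
        PySem.Str.pyGet? M (c - k - 1) = PySem.Str.pyGet? M (c + k + 1)) := by
      rintro ⟨-, hb, -⟩; omega
    cases f2 with
    | zero => rfl
    | succ f2 =>
      show pvRadLoop M n c k 0 = pvRadLoop M n c k (f2 + 1)
      unfold pvRadLoop
      rw [if_neg hnP]
  | succ f1 ih =>
    intro f2 k h1 h2
    by_cases hP : 0 ≤ c - k - 1 ∧ c + k + 1 < n ∧
        PySem.Str.pyGet? M (c - k - 1) = PySem.Str.pyGet? M (c + k + 1)
    · have hb : c + k + 1 < n := hP.2.1
      cases f2 with
      | zero => omega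
      | succ f2 =>
        show pvRadLoop M n c k (f1 + 1) = pvRadLoop M n c k (f2 + 1)
        unfold pvRadLoop
        rw [if_pos hP, if_pos hP]
        exact ih f2 (k + 1) (by omega) (by omega)
    · cases f2 with
      | zero =>
        show pvRadLoop M n c k (f1 + 1) = pvRadLoop M n c k 0
        unfold pvRadLoop
        rw [if_neg hP]
      | succ f2 =>
        show pvRadLoop M n c k (f1 + 1) = pvRadLoop M n c k (f2 + 1)
        unfold pvRadLoop
        rw [if_neg hP, if_neg hP]

theorem pvK_nonneg (M : String) (n c : Int) : 0 ≤ pvK M n c :=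
  le_trans le_rfl (by simpa using pvRadLoop_ge M n c (n.toNat + 1) 0)

-- ---- A's expansion produces exactly the radii 0..K(c) ----

theorem pvExpandA_eq (M : String) (n c : Int) :
    ∀ (f : Nat) (k : Int) (acc : List (Int × Int × Int)),
      pvExpandA M n (c - k - 1) (c + k + 1) f acc =
        acc ++ (PySem.List.pyRange (k + 1) (pvRadLoop M n c k f + 1) 1).map (pvTri c) := by
  intro f
  induction f with
  | zero =>
    intro k acc
    simp [pvExpandA, pvRadLoop, PySem.List.pyRange_one_eq_nil (by omega : (k:Int) + 1 ≤ k + 1)]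
  | succ f ih =>
    intro k acc
    by_cases hP : 0 ≤ c - k - 1 ∧ c + k + 1 < n ∧
        PySem.Str.pyGet? M (c - k - 1) = PySem.Str.pyGet? M (c + k + 1)
    · have hmod : PySem.Int.mod (c + k + 1 - (c - k - 1) + 1) 2 = 1 := by
        rw [PySem.Int.mod_eq_emod_of_pos (by omega)]; omega
      have harg1 : c + k + 1 - (c - k - 1) + 1 = 2 * (k + 1) + 1 := by ring
      have he1 : c - k - 1 - 1 = c - (k + 1) - 1 := by ring
      have he2 : c + k + 1 + 1 = c + (k + 1) + 1 := by ring
      have hcons : pvRadLoop M n c k (f + 1) = pvRadLoop M n c (k + 1) f := by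
        simp only [pvRadLoop]; rw [if_pos hP]
      unfold pvExpandA
      rw [if_pos hP, if_pos hmod, harg1, he1, he2, ih (k + 1) _, hcons]
      have hlt : k + 1 < pvRadLoop M n c (k + 1) f + 1 := by
        have := pvRadLoop_ge M n c f (k + 1); omega
      rw [PySem.List.pyRange_one_cons hlt, List.map_cons]
      simp [pvTri]
      omega
    · have hstop : pvRadLoop M n c k (f + 1) = k := by
        simp only [pvRadLoop]; rw [if_neg hP]
      unfold pvExpandA
      rw [if_neg hP, hstop,
        PySem.List.pyRange_one_eq_nil (by omega : (k:Int) + 1 ≤ k + 1)]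
      simp

theorem pvExpandA_center (M : String) (n c : Int) (hc : 0 ≤ c) (hcn : c < n)
    (acc : List (Int × Int × Int)) :
    pvExpandA M n c c (n.toNat + 1) acc =
      acc ++ (PySem.List.pyRange 0 (pvK M n c + 1) 1).map (pvTri c) := by
  have hP : 0 ≤ c ∧ c < n ∧ PySem.Str.pyGet? M c = PySem.Str.pyGet? M c := ⟨hc, hcn, rfl⟩
  have hmod : PySem.Int.mod (c - c + 1) 2 = 1 := by
    rw [PySem.Int.mod_eq_emod_of_pos (by omega)]; omega
  unfold pvExpandA
  rw [if_pos hP, if_pos hmod]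
  have he1 : c - 1 = c - 0 - 1 := by ring
  have he2 : c + 1 = c + 0 + 1 := by ring
  rw [he1, he2, pvExpandA_eq M n c n.toNat 0]
  have hfuel : pvRadLoop M n c 0 n.toNat = pvRadLoop M n c 0 (n.toNat + 1) := by
    apply pvRadLoop_fuel <;> omega
  have hK0 : 0 ≤ pvK M n c := pvK_nonneg M n c
  rw [hfuel]
  show acc ++ [(c, c, c - c + 1)] ++ _ = acc ++ _
  rw [PySem.List.pyRange_one_cons (by omega : (0:Int) < pvK M n c + 1), List.map_cons]
  simp [pvTri, pvK]

theorem pvPalindromes_eq (M : String) (n : Int) :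
    (PySem.List.pyRange 0 n 1).foldl
        (fun acc center => pvExpandA M n center center (n.toNat + 1) acc) [] = pvL M n := by
  have h := PySem.List.foldl_congr_mem (PySem.List.pyRange 0 n 1)
    (fun acc center => pvExpandA M n center center (n.toNat + 1) acc)
    (fun acc c => acc ++ (PySem.List.pyRange 0 (pvK M n c + 1) 1).map (pvTri c)) []
    (by
      intro acc c hc
      rw [PySem.List.mem_pyRange_one] at hc
      exact pvExpandA_center M n c hc.1 hc.2 acc)
  rw [h, PySem.List.foldl_append_eq_flatMap]
  rfl

theorem pvMem_L (M : String) (n : Int) (p : Int × Int × Int) :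
    p ∈ pvL M n ↔ ∃ c t, pvGood M n c t ∧ p = pvTri c t := by
  simp only [pvL, List.mem_flatMap, List.mem_map, PySem.List.mem_pyRange_one, pvGood]
  constructor
  · rintro ⟨c, ⟨hc1, hc2⟩, t, ⟨ht1, ht2⟩, rfl⟩
    exact ⟨c, t, ⟨hc1, hc2, ht1, by omega⟩, rfl⟩
  · rintro ⟨c, t, ⟨hc1, hc2, ht1, ht2⟩, rfl⟩
    exact ⟨c, ⟨hc1, hc2⟩, t, ⟨ht1, by omega⟩, rfl⟩

-- ---- the pair fold ----

theorem pvPairFold_le (L : List (Int × Int × Int)) (B : Int) (hB : 0 ≤ B)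
    (h : ∀ a b, a ∈ L → b ∈ L → (a.2.1 < b.1 ∨ b.2.1 < a.1) → a.2.2 * b.2.2 ≤ B) :
    pvPairFold L ≤ B := by
  unfold pvPairFold
  apply pvFoldlLeOfLe _ _ B 0 hB
  intro acc i hi hacc
  apply pvFoldlLeOfLe _ _ B acc hacc
  intro acc2 j hj hacc2
  rw [PySem.List.mem_pyRange_one] at hi hj
  simp only [PySem.List.len_eq] at hi hj
  have hia : PySem.List.pyGetD L i (0, 0, 0) ∈ L :=
    PySem.List.pyGetD_mem L (0, 0, 0)
      (by simp only [PySem.Raise.InRange]; constructor <;> omega)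
  have hjb : PySem.List.pyGetD L j (0, 0, 0) ∈ L :=
    PySem.List.pyGetD_mem L (0, 0, 0)
      (by simp only [PySem.Raise.InRange]; constructor <;> omega)
  simp only []
  split_ifs with hcond
  · exact max_le hacc2 (h _ _ hia hjb hcond)
  · exact hacc2

theorem pvPairFold_nonneg (L : List (Int × Int × Int)) : 0 ≤ pvPairFold L := by
  unfold pvPairFold
  apply pvFoldlGeInit
  intro acc i _
  apply pvFoldlGeInit
  intro acc2 j _
  simp only []
  split_ifs
  · exact le_max_left _ _
  · exact le_rfl

theorem pvPairFold_ge (L : List (Int × Int × Int)) (l1 l2 l3 : List (Int × Int × Int))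
    (a b : Int × Int × Int) (hL : L = l1 ++ a :: l2 ++ b :: l3)
    (hc : a.2.1 < b.1 ∨ b.2.1 < a.1) : a.2.2 * b.2.2 ≤ pvPairFold L := by
  have hget_i : PySem.List.pyGetD L ((l1.length : Int)) (0, 0, 0) = a := by
    subst hL
    rw [PySem.List.pyGetD_natCast,
      List.getD_append _ _ _ _ (by simp only [List.length_append, List.length_cons]; omega),
      List.getD_append_right l1 (a :: l2) (0, 0, 0) l1.length le_rfl]
    simp
  have hget_j : PySem.List.pyGetD L ((l1.length + l2.length + 1 : Int)) (0, 0, 0) = b := by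
    subst hL
    have hm : (l1.length + l2.length + 1 : Int) = ((l1.length + l2.length + 1 : Nat) : Int) := by
      push_cast; ring
    rw [hm, PySem.List.pyGetD_natCast,
      show l1 ++ a :: l2 ++ b :: l3 = (l1 ++ a :: l2) ++ b :: l3 by simp,
      List.getD_append_right (l1 ++ a :: l2) (b :: l3) (0, 0, 0) (l1.length + l2.length + 1)
        (by simp only [List.length_append, List.length_cons]; omega)]
    have hz : l1.length + l2.length + 1 - (l1 ++ a :: l2).length = 0 := by
      simp only [List.length_append, List.length_cons]; omega
    rw [hz]
    simp
  have hlen : (PySem.List.len L) = (L.length : Int) := by simp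
  have hLlen : (L.length : Int) = l1.length + l2.length + l3.length + 2 := by
    subst hL
    simp [List.length_append]
    omega
  have h0i : (0:Int) ≤ l1.length := by positivity
  have hij : (l1.length : Int) < l1.length + l2.length + 1 := by
    have : (0:Int) ≤ l2.length := by positivity
    omega
  have hjL : (l1.length + l2.length + 1 : Int) < (L.length : Int) := by
    have : (0:Int) ≤ l3.length := by positivity
    omega
  unfold pvPairFold
  apply pvFoldlGeOfMem _ _ _ _ ((l1.length : Int))
  · rw [PySem.List.mem_pyRange_one, hlen]; omega
  · intro acc y _
    apply pvFoldlGeInit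
    intro acc2 j _
    simp only []
    split_ifs
    · exact le_max_left _ _
    · exact le_rfl
  · intro acc
    apply pvFoldlGeOfMem _ _ _ _ ((l1.length + l2.length + 1 : Int))
    · rw [PySem.List.mem_pyRange_one, hlen]; omega
    · intro acc2 y _
      simp only []
      split_ifs
      · exact le_max_left _ _
      · exact le_rfl
    · intro acc2
      simp only [hget_i, hget_j]
      rw [if_pos hc]
      exact le_max_right _ _

theorem pvL_split (M : String) (n c1 t1 c2 t2 : Int)
    (h1 : pvGood M n c1 t1) (h2 : pvGood M n c2 t2) (hlt : c1 < c2) :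
    ∃ l1 l2 l3, pvL M n = l1 ++ pvTri c1 t1 :: l2 ++ pvTri c2 t2 :: l3 := by
  obtain ⟨hc1a, hc1b, ht1a, ht1b⟩ := h1
  obtain ⟨hc2a, hc2b, ht2a, ht2b⟩ := h2
  have hr : PySem.List.pyRange 0 n 1 =
      PySem.List.pyRange 0 c1 1 ++ c1 :: (PySem.List.pyRange (c1+1) c2 1 ++
        c2 :: PySem.List.pyRange (c2+1) n 1) := by
    rw [PySem.List.pyRange_one_append 0 c1 n (by omega) (by omega),
      PySem.List.pyRange_one_cons (by omega : c1 < n),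
      PySem.List.pyRange_one_append (c1+1) c2 n (by omega) (by omega),
      PySem.List.pyRange_one_cons (by omega : c2 < n)]
  have hg1 : (PySem.List.pyRange 0 (pvK M n c1 + 1) 1).map (pvTri c1) =
      (PySem.List.pyRange 0 t1 1).map (pvTri c1) ++ pvTri c1 t1 ::
        (PySem.List.pyRange (t1+1) (pvK M n c1 + 1) 1).map (pvTri c1) := by
    rw [PySem.List.pyRange_one_append 0 t1 (pvK M n c1 + 1) (by omega) (by omega),
      PySem.List.pyRange_one_cons (by omega : t1 < pvK M n c1 + 1)]
    simp
  have hg2 : (PySem.List.pyRange 0 (pvK M n c2 + 1) 1).map (pvTri c2) =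
      (PySem.List.pyRange 0 t2 1).map (pvTri c2) ++ pvTri c2 t2 ::
        (PySem.List.pyRange (t2+1) (pvK M n c2 + 1) 1).map (pvTri c2) := by
    rw [PySem.List.pyRange_one_append 0 t2 (pvK M n c2 + 1) (by omega) (by omega),
      PySem.List.pyRange_one_cons (by omega : t2 < pvK M n c2 + 1)]
    simp
  refine ⟨(PySem.List.pyRange 0 c1 1).flatMap
      (fun c => (PySem.List.pyRange 0 (pvK M n c + 1) 1).map (pvTri c)) ++
      (PySem.List.pyRange 0 t1 1).map (pvTri c1),
    (PySem.List.pyRange (t1+1) (pvK M n c1 + 1) 1).map (pvTri c1) ++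
      (PySem.List.pyRange (c1+1) c2 1).flatMap
        (fun c => (PySem.List.pyRange 0 (pvK M n c + 1) 1).map (pvTri c)) ++
      (PySem.List.pyRange 0 t2 1).map (pvTri c2),
    (PySem.List.pyRange (t2+1) (pvK M n c2 + 1) 1).map (pvTri c2) ++
      (PySem.List.pyRange (c2+1) n 1).flatMap
        (fun c => (PySem.List.pyRange 0 (pvK M n c + 1) 1).map (pvTri c)), ?_⟩
  unfold pvL
  rw [hr]
  rw [List.flatMap_append, List.flatMap_cons, List.flatMap_append, List.flatMap_cons]
  rw [hg1, hg2]
  simp [List.append_assoc]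

-- ---- relating the two max tables to good palindromes ----

theorem pvGood_disj_le_B (M : String) (n c1 t1 c2 t2 : Int)
    (h1 : pvGood M n c1 t1) (h2 : pvGood M n c2 t2) (hd : c1 + t1 < c2 - t2) :
    (2 * t1 + 1) * (2 * t2 + 1) ≤ pvB M n := by
  obtain ⟨hc1a, hc1b, ht1a, ht1b⟩ := h1
  obtain ⟨hc2a, hc2b, ht2a, ht2b⟩ := h2
  have hs1 : 0 ≤ c1 + t1 := by omega
  have hs2 : c1 + t1 < n - 1 := by omega
  have hn2 : ¬ n < 2 := by omega
  rw [pvB, if_neg hn2]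
  refine le_trans ?_ (pvLe_maxD 0 (n - 1) (c1 + t1) hs1 hs2 _)
  have hpref : 2 * t1 + 1 ≤ pvPref M n (c1 + t1) := by
    have := pvLe_maxD 0 (c1 + t1 + 1) c1 (by omega) (by omega)
      (fun c => 2 * min (c1 + t1 - c) (pvK M n c) + 1)
    rw [show c1 + t1 - c1 = t1 by ring, min_eq_left ht1b] at this
    exact this
  have hsuf : 2 * t2 + 1 ≤ pvSuf M n (c1 + t1 + 1) := by
    refine le_trans ?_ (pvLe_maxD (c1 + t1 + 1) n c2 (by omega) hc2b
      (fun c => 2 * min (c - (c1 + t1 + 1)) (pvK M n c) + 1))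
    have hmin : t2 ≤ min (c2 - (c1 + t1 + 1)) (pvK M n c2) := le_min (by omega) ht2b
    omega
  exact mul_le_mul hpref hsuf (by omega) (le_trans (by omega) hpref)

theorem pvB_le_pairFold (M : String) (n : Int) : pvB M n ≤ pvPairFold (pvL M n) := by
  rw [pvB]
  split_ifs with hn
  · exact pvPairFold_nonneg _
  · apply pvMaxD_le 0 (n - 1) (by omega) _ _
    intro s hs1 hs2
    obtain ⟨c1, hc1a, hc1b, hc1v⟩ := pvMaxD_mem 0 (s + 1) (by omega)
      (fun c => 2 * min (s - c) (pvK M n c) + 1)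
    obtain ⟨c2, hc2a, hc2b, hc2v⟩ := pvMaxD_mem (s + 1) n (by omega)
      (fun c => 2 * min (c - (s + 1)) (pvK M n c) + 1)
    have hK1 : 0 ≤ pvK M n c1 := pvK_nonneg M n c1
    have hK2 : 0 ≤ pvK M n c2 := pvK_nonneg M n c2
    set t1 := min (s - c1) (pvK M n c1) with ht1
    set t2 := min (c2 - (s + 1)) (pvK M n c2) with ht2
    have hg1 : pvGood M n c1 t1 := ⟨hc1a, by omega, by simp [ht1]; omega, min_le_right _ _⟩
    have hg2 : pvGood M n c2 t2 := ⟨by omega, hc2b, by simp [ht2]; omega, min_le_right _ _⟩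
    have hdisj : c1 + t1 < c2 - t2 := by
      have h1 : t1 ≤ s - c1 := min_le_left _ _
      have h2 : t2 ≤ c2 - (s + 1) := min_le_left _ _
      omega
    obtain ⟨l1, l2, l3, hsplit⟩ := pvL_split M n c1 t1 c2 t2 hg1 hg2 (by omega)
    have := pvPairFold_ge (pvL M n) l1 l2 l3 (pvTri c1 t1) (pvTri c2 t2) hsplit
      (by simp only [pvTri]; left; omega)
    simp only [pvTri] at this
    calc pvPref M n s * pvSuf M n (s + 1)
        = (2 * t1 + 1) * (2 * t2 + 1) := by rw [pvPref, pvSuf, hc1v, hc2v]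
      _ ≤ pvPairFold (pvL M n) := this

theorem pvPairFold_le_B (M : String) (n : Int) : pvPairFold (pvL M n) ≤ pvB M n := by
  have hBnn : 0 ≤ pvB M n := by
    rw [pvB]
    split_ifs with hn
    · exact le_rfl
    · have h1 : (1:Int) ≤ pvPref M n 0 := by
        have := pvLe_maxD 0 1 0 le_rfl (by omega)
          (fun c => 2 * min (0 - c) (pvK M n c) + 1)
        have hK : 0 ≤ pvK M n 0 := pvK_nonneg M n 0
        simpa [min_eq_left, hK] using this
      have h2 : (1:Int) ≤ pvSuf M n 1 := by
        have := pvLe_maxD 1 n 1 le_rfl (by omega)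
          (fun c => 2 * min (c - 1) (pvK M n c) + 1)
        have hK : 0 ≤ pvK M n 1 := pvK_nonneg M n 1
        simpa [min_eq_left, hK] using this
      have hp : (0:Int) ≤ pvPref M n 0 * pvSuf M n (0 + 1) := by
        have := mul_le_mul h1 h2 (by omega) (le_trans zero_le_one h1)
        simpa using le_trans (by omega) this
      exact le_trans hp (pvLe_maxD 0 (n - 1) 0 le_rfl (by omega) _)
  apply pvPairFold_le _ _ hBnn
  intro a b ha hb hcond
  rw [pvMem_L] at ha hb
  obtain ⟨c1, t1, hg1, rfl⟩ := ha
  obtain ⟨c2, t2, hg2, rfl⟩ := hb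
  simp only [pvTri] at hcond ⊢
  rcases hcond with h | h
  · exact pvGood_disj_le_B M n c1 t1 c2 t2 hg1 hg2 (by omega)
  · rw [mul_comm]
    exact pvGood_disj_le_B M n c2 t2 c1 t1 hg2 hg1 (by omega)

-- ---- the ports equal the models ----

theorem pvA_eq (M : String) :
    max_magical_power M = pvPairFold (pvL M (PySem.Str.len M)) := by
  simp only [max_magical_power]
  rw [pvPalindromes_eq]
  rfl

theorem pvB_eq (M : String) :
    max_magical_power_alt M = pvB M (PySem.Str.len M) := by
  simp only [max_magical_power_alt, pvB]
  set n := PySem.Str.len M with hn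
  split_ifs with hlt
  · rfl
  · have hrad : (PySem.List.pyRange 0 n 1).foldl
        (fun acc c => acc ++ [pvRadLoop M n c 0 (n.toNat + 1)]) [] =
        (PySem.List.pyRange 0 n 1).map (fun c => pvRadLoop M n c 0 (n.toNat + 1)) := by
      rw [PySem.List.foldl_append_singleton_eq_map]; rfl
    have hradget : ∀ c : Int, 0 ≤ c → c < n →
        PySem.List.pyGetD ((PySem.List.pyRange 0 n 1).foldl
          (fun acc c => acc ++ [pvRadLoop M n c 0 (n.toNat + 1)]) []) c 0 = pvK M n c := by
      intro c h0 hc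
      rw [hrad]
      exact PySem.List.pyGetD_map_pyRange_of_nonneg _ n c 0 h0 hc
    have hpref : ∀ s : Int, 0 ≤ s → s < n →
        PySem.List.maxD ((PySem.List.pyRange 0 (s + 1) 1).map
          (fun c => 2 * min (s - c) (PySem.List.pyGetD
            ((PySem.List.pyRange 0 n 1).foldl
              (fun acc c => acc ++ [pvRadLoop M n c 0 (n.toNat + 1)]) []) c 0) + 1))
          (fun x => x) 0 = pvPref M n s := by
      intro s h0 hsn
      rw [pvPref]
      congr 1
      apply List.map_congr_left
      intro c hc
      rw [PySem.List.mem_pyRange_one] at hc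
      rw [hradget c hc.1 (by omega)]
    have hsuf : ∀ s : Int, 0 ≤ s → s ≤ n →
        PySem.List.maxD ((PySem.List.pyRange s n 1).map
          (fun c => 2 * min (c - s) (PySem.List.pyGetD
            ((PySem.List.pyRange 0 n 1).foldl
              (fun acc c => acc ++ [pvRadLoop M n c 0 (n.toNat + 1)]) []) c 0) + 1))
          (fun x => x) 0 = pvSuf M n s := by
      intro s h0 hsn
      rw [pvSuf]
      congr 1
      apply List.map_congr_left
      intro c hc
      rw [PySem.List.mem_pyRange_one] at hc
      rw [hradget c (by omega) hc.2]
    congr 1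
    apply List.map_congr_left
    intro s hs
    rw [PySem.List.mem_pyRange_one] at hs
    rw [PySem.List.pyGetD_map_pyRange_of_nonneg _ n s 0 hs.1 (by omega),
      PySem.List.pyGetD_map_pyRange_of_nonneg _ n (s + 1) 0 (by omega) (by omega),
      hpref s hs.1 (by omega), hsuf (s + 1) (by omega) (by omega)]

-- ===== VERDICT (by name: the statement is the Claim_ definition above) =====
theorem max_magical_power_spec : Claim_equal_max_magical_power := by
  intro M _
  unfold Spec_max_magical_power
  rw [pvA_eq, pvB_eq]
  exact le_antisymm (pvPairFold_le_B M _) (pvB_le_pairFold M _)
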